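-- pv_equiv track=rewrite | github.com/vigneshsabapathi/python-algorithms | bit_manipulation/binary_or_operator_optimized.py | binary_or_format
-- ===== SOURCE A (Python) =====
-- def binary_or_format(a: int, b: int) -> str:
--     """
--     Binary OR using format(a, "b") — removes the str(bin()) double-wrap.
--
--     The reference uses str(bin(a))[2:]; bin() already returns a str so
--     str() is redundant.  format(a, "b") is the idiomatic single call.
--
--     >>> binary_or_format(25, 32)
--     '0b111001'
--     >>> binary_or_format(37, 50)
--     '0b110111'
--     >>> binary_or_format(21, 30)
--     '0b11111'
--     >>> binary_or_format(58, 73)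
--     '0b1111011'
--     >>> binary_or_format(0, 255)
--     '0b11111111'
--     >>> binary_or_format(0, 256)
--     '0b100000000'
--     >>> binary_or_format(0, -1)
--     Traceback (most recent call last):
--         ...
--     ValueError: the value of both inputs must be positive
--     """
--     if a < 0 or b < 0:
--         raise ValueError("the value of both inputs must be positive")
--     a_bin = format(a, "b")
--     b_bin = format(b, "b")
--     max_len = max(len(a_bin), len(b_bin))
--     return "0b" + "".join(
--         str(int("1" in (ca, cb)))
--         for ca, cb in zip(a_bin.zfill(max_len), b_bin.zfill(max_len))
--     )
-- ===== SOURCE B (Python) =====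
-- def binary_or_format(a: int, b: int) -> str:
--     if a < 0 or b < 0:
--         raise ValueError("the value of both inputs must be positive")
--     return "0b" + format(a | b, "b")
-- ===== Notes on version B (the rewrite author's own statement) =====
-- stated objective: simpler
-- what changed: Replaces A's per-character pass over the two zero-padded binary strings (zfill, zip, join over a generator) with a single integer bitwise OR formatted once.
import Mathlib
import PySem

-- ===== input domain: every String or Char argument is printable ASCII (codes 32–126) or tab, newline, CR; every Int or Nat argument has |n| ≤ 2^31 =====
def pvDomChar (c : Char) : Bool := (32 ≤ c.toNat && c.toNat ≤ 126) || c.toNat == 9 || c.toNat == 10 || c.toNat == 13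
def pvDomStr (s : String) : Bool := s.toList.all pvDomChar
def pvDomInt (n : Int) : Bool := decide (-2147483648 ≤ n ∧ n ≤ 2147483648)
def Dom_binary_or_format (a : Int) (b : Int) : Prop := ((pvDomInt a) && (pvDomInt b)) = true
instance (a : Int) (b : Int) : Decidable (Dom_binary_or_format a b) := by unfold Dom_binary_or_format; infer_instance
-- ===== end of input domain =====

-- ===== PORT A =====
-- B replaces A's per-character OR over the zero-padded binary strings by one integer OR
-- formatted once (objective: simpler).
-- Port of A: format(a,"b") = PySem.Int.toBin; zfill = PySem.Str.zfill; the generator's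
-- str(int("1" in (ca, cb))) is '1' iff ca = '1' or cb = '1' (written out literally).
-- On the guard branch Python raises ValueError (excluded by Pre_); the port returns "".
def binary_or_format (a : Int) (b : Int) : String :=
  if a < 0 || b < 0 then ""
  else
    let a_bin := PySem.Int.toBin a
    let b_bin := PySem.Int.toBin b
    let max_len : Int := max (PySem.Str.len a_bin) (PySem.Str.len b_bin)
    "0b" ++ String.ofList
      (((PySem.Str.zfill a_bin max_len).toList.zip (PySem.Str.zfill b_bin max_len).toList).map
        (fun p => if p.1 = '1' ∨ p.2 = '1' then '1' else '0'))

-- ===== PORT B =====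
-- Port of B: a | b = PySem.Int.bor, format(_, "b") = PySem.Int.toBin; same guard, "" where
-- Python raises (excluded by Pre_).
def binary_or_format_alt (a : Int) (b : Int) : String :=
  if a < 0 || b < 0 then ""
  else "0b" ++ PySem.Int.toBin (PySem.Int.bor a b)

-- ===== PRECONDITION & SPEC =====
-- Pre_: exactly the inputs on which A returns; A raises ValueError when a < 0 or b < 0.
def Pre_binary_or_format (a : Int) (b : Int) : Prop := 0 ≤ a ∧ 0 ≤ b
instance (a : Int) (b : Int) : Decidable (Pre_binary_or_format a b) := by
  unfold Pre_binary_or_format; infer_instance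
def pvWitness_binary_or_format : Int × Int := (25, 32)
def Spec_binary_or_format (a : Int) (b : Int) (out : String) : Prop := out = binary_or_format_alt a b
instance (a : Int) (b : Int) (out : String) : Decidable (Spec_binary_or_format a b out) := by
  unfold Spec_binary_or_format; infer_instance

-- ===== CLAIM (what is proved, stated in full; the proofs are below) =====
def Claim_equal_binary_or_format : Prop := ∀ (a : Int) (b : Int), Dom_binary_or_format a b → Pre_binary_or_format a b → Spec_binary_or_format a b (binary_or_format a b)

-- ===== LEMMAS AND PROOFS =====

/-- Recursive characterisation of the binary digit string (MSB first). -/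
def bchars (n : Nat) : List Char :=
  if _h : n < 2 then [Nat.digitChar n]
  else bchars (n / 2) ++ [Nat.digitChar (n % 2)]
  decreasing_by omega

/-- The binary string of `n` padded with leading zeros to width `k`. -/
def padBits (k n : Nat) : List Char :=
  (List.range k).reverse.map (fun i => if n.testBit i then '1' else '0')

theorem toDigitsCore_shift (f : Nat) : ∀ (n : Nat) (acc : List Char),
    Nat.toDigitsCore 2 f n acc = Nat.toDigitsCore 2 f n [] ++ acc := by
  induction f with
  | zero => intro n acc; simp [Nat.toDigitsCore]
  | succ f ih =>
    intro n acc
    simp only [Nat.toDigitsCore]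
    by_cases h : n / 2 = 0
    · simp [h]
    · simp only [h, if_false]
      rw [ih (n / 2) (Nat.digitChar (n % 2) :: acc), ih (n / 2) [Nat.digitChar (n % 2)]]
      simp

theorem toDigitsCore_eq_bchars (f : Nat) : ∀ n : Nat, n < f →
    Nat.toDigitsCore 2 f n [] = bchars n := by
  induction f with
  | zero => intro n h; omega
  | succ f ih =>
    intro n hn
    simp only [Nat.toDigitsCore]
    by_cases h : n / 2 = 0
    · have hn2 : n < 2 := by omega
      rw [bchars]
      simp only [hn2, dif_pos, if_pos h]
      have : n % 2 = n := Nat.mod_eq_of_lt hn2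
      rw [this]
    · have hn2 : ¬ n < 2 := by omega
      simp only [h, if_false]
      rw [toDigitsCore_shift, ih (n / 2) (by omega)]
      conv_rhs => rw [bchars]
      simp [hn2]

theorem toDigits_eq_bchars (n : Nat) : Nat.toDigits 2 n = bchars n :=
  toDigitsCore_eq_bchars (n + 1) n (by omega)

theorem padBits_succ_lsb (k n : Nat) :
    padBits (k + 1) n = padBits k (n / 2) ++ [Nat.digitChar (n % 2)] := by
  unfold padBits
  rw [List.range_succ_eq_map]
  simp only [List.reverse_cons, List.map_reverse, List.map_map, List.map_append,
    List.map_cons, List.map_nil]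
  congr 1
  · exact congrArg List.reverse (List.map_congr_left (fun i _ => by
      simp only [Function.comp_apply, Nat.testBit_succ]))
  · rcases Nat.mod_two_eq_zero_or_one n with h | h <;>
      simp [Nat.testBit_zero, h, Nat.digitChar]

theorem padBits_succ_msb (k n : Nat) :
    padBits (k + 1) n = (if n.testBit k then '1' else '0') :: padBits k n := by
  unfold padBits
  rw [List.range_succ]
  simp

theorem length_padBits (k n : Nat) : (padBits k n).length = k := by
  simp [padBits]

theorem mem_padBits (k n : Nat) (c : Char) (h : c ∈ padBits k n) : c = '0' ∨ c = '1' := by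
  unfold padBits at h
  rcases List.mem_map.mp h with ⟨i, _, hi⟩
  by_cases hb : n.testBit i <;> simp [hb] at hi <;> tauto

theorem size_div_two (n : Nat) (h : 2 ≤ n) : n.size = (n / 2).size + 1 := by
  have h1 : 1 ≤ n / 2 := by omega
  apply le_antisymm
  · rw [Nat.size_le]
    have := Nat.lt_size_self (n / 2)
    have : n < 2 ^ ((n / 2).size + 1) := by
      rw [pow_succ]
      omega
    exact this
  · have hs : 1 ≤ (n / 2).size := Nat.size_pos.mpr h1
    have h2 : 2 ^ ((n / 2).size - 1) ≤ n / 2 := Nat.lt_size.mp (by omega)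
    have h3 : 2 ^ (n / 2).size ≤ n := by
      have : 2 ^ (n / 2).size = 2 ^ ((n / 2).size - 1) * 2 := by
        rw [← pow_succ]
        congr 1
        omega
      omega
    have : (n / 2).size < n.size := Nat.lt_size.mpr h3
    omega

theorem bchars_eq_padBits (n : Nat) : bchars n = padBits (max 1 n.size) n := by
  induction n using Nat.strong_induction_on with
  | _ n ih =>
    by_cases h : n < 2
    · interval_cases n <;> rw [bchars] <;> decide
    · have h2 : 2 ≤ n := by omega
      have h1 : 1 ≤ n / 2 := by omega
      have hs : 1 ≤ (n / 2).size := Nat.size_pos.mpr h1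
      have hsz := size_div_two n h2
      have hmax : max 1 n.size = max 1 (n / 2).size + 1 := by omega
      rw [bchars]
      simp only [h, dif_neg, not_false_iff]
      rw [ih (n / 2) (by omega), hmax, padBits_succ_lsb]

theorem size_or (m n : Nat) : (m ||| n).size = max m.size n.size := by
  apply le_antisymm
  · rw [Nat.size_le]
    exact Nat.or_lt_two_pow
      (lt_of_lt_of_le (Nat.lt_size_self m) (Nat.pow_le_pow_right (by omega) (le_max_left _ _)))
      (lt_of_lt_of_le (Nat.lt_size_self n) (Nat.pow_le_pow_right (by omega) (le_max_right _ _)))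
  · apply max_le
    · exact Nat.size_le_size Nat.left_le_or
    · exact Nat.size_le_size (Nat.lor_comm m n ▸ Nat.left_le_or)

theorem padBits_extend (k n : Nat) (hk : n.size ≤ k) : ∀ L, k ≤ L →
    padBits L n = List.replicate (L - k) '0' ++ padBits k n := by
  intro L
  induction L with
  | zero =>
    intro h
    have hk0 : k = 0 := by omega
    simp [hk0]
  | succ L ihL =>
    intro h
    by_cases hL : k ≤ L
    · rw [padBits_succ_msb]
      have hbit : n.testBit L = false :=
        Nat.testBit_lt_two_pow
          (lt_of_lt_of_le (Nat.lt_size_self n) (Nat.pow_le_pow_right (by omega) (by omega)))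
      rw [hbit, ihL hL]
      have : L + 1 - k = (L - k) + 1 := by omega
      rw [this, List.replicate_succ]
      simp
    · have : k = L + 1 := by omega
      simp [this]

theorem zfill_digits (cs : List Char) (L : Nat)
    (hne : cs ≠ []) (hh : ∀ c ∈ cs, c = '0' ∨ c = '1') (hL : cs.length ≤ L) :
    PySem.Chars.zfill cs (L : Int) = List.replicate (L - cs.length) '0' ++ cs := by
  unfold PySem.Chars.zfill
  by_cases hle : (L : Int) ≤ (cs.length : Int)
  · have : L = cs.length := by omega
    simp [this]
  · simp only [hle, if_false]
    match cs, hne with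
    | c :: rest, _ =>
      have hc := hh c (List.mem_cons_self)
      have hplus : ¬ (c = '+' ∨ c = '-') := by rcases hc with h | h <;> simp [h]
      simp only [hplus, if_false]
      simp

theorem zip_or_padBits (L m n : Nat) :
    ((padBits L m).zip (padBits L n)).map
        (fun p => if p.1 = '1' ∨ p.2 = '1' then '1' else '0') =
      padBits L (m ||| n) := by
  unfold padBits
  rw [List.zip_map', List.map_map]
  apply List.map_congr_left
  intro i _
  simp only [Function.comp_apply, Nat.testBit_or]
  by_cases hm : m.testBit i <;> by_cases hn : n.testBit i <;> simp [hm, hn]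

theorem toBinChars_or (m n : Nat) :
    let La := max 1 (Nat.toDigits 2 m).length
    let Lb := max 1 (Nat.toDigits 2 n).length
    let L := max La Lb
    (((PySem.Chars.zfill (Nat.toDigits 2 m) (L : Int)).zip
        (PySem.Chars.zfill (Nat.toDigits 2 n) (L : Int))).map
      (fun p => if p.1 = '1' ∨ p.2 = '1' then '1' else '0')) = Nat.toDigits 2 (m ||| n) := by
  intro La Lb L
  have hm : Nat.toDigits 2 m = padBits (max 1 m.size) m := by
    rw [toDigits_eq_bchars]; exact bchars_eq_padBits m
  have hn : Nat.toDigits 2 n = padBits (max 1 n.size) n := by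
    rw [toDigits_eq_bchars]; exact bchars_eq_padBits n
  have hLa : La = max 1 m.size := by simp [La, hm, length_padBits]
  have hLb : Lb = max 1 n.size := by simp [Lb, hn, length_padBits]
  have hmem_m := mem_padBits (max 1 m.size) m
  have hmem_n := mem_padBits (max 1 n.size) n
  have hlen_m : (padBits (max 1 m.size) m).length = max 1 m.size := length_padBits _ _
  have hlen_n : (padBits (max 1 n.size) n).length = max 1 n.size := length_padBits _ _
  have hne_m : padBits (max 1 m.size) m ≠ [] := by
    intro h; rw [h] at hlen_m; simp at hlen_m; omega
  have hne_n : padBits (max 1 n.size) n ≠ [] := by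
    intro h; rw [h] at hlen_n; simp at hlen_n; omega
  have hLm : max 1 m.size ≤ L := hLa ▸ le_max_left La Lb
  have hLn : max 1 n.size ≤ L := hLb ▸ le_max_right La Lb
  rw [hm, hn, zfill_digits _ L hne_m (fun c hc => hmem_m c hc) (by omega),
    zfill_digits _ L hne_n (fun c hc => hmem_n c hc) (by omega), hlen_m, hlen_n,
    ← padBits_extend (max 1 m.size) m (by omega) L hLm,
    ← padBits_extend (max 1 n.size) n (by omega) L hLn,
    zip_or_padBits]
  rw [toDigits_eq_bchars, bchars_eq_padBits]
  congr 1
  rw [size_or]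
  omega

-- ===== VERDICT (by name: the statement is the Claim_ definition above) =====
set_option maxHeartbeats 1000000 in
theorem binary_or_format_spec : Claim_equal_binary_or_format := by
  intro a b _hdom hpre
  obtain ⟨ha, hb⟩ := hpre
  have hg : (a < 0 || b < 0) = false := by
    simp only [Bool.or_eq_false_iff, decide_eq_false_iff_not]
    omega
  unfold Spec_binary_or_format
  simp only [binary_or_format, binary_or_format_alt, hg, Bool.false_eq_true, if_false]
  refine congrArg (fun t => "0b" ++ t) ?_
  apply String.ext
  rw [String.toList_ofList, PySem.Int.toList_toBin]
  rw [PySem.Int.bor_of_nonneg ha hb]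
  have hba : PySem.Int.toBinChars ((a.toNat ||| b.toNat : Nat) : Int) =
      Nat.toDigits 2 (a.toNat ||| b.toNat) := by
    unfold PySem.Int.toBinChars
    have : ¬ ((a.toNat ||| b.toNat : Nat) : Int) < 0 := not_lt.mpr (Int.natCast_nonneg _)
    simp [this]
  rw [hba]
  have htA : (PySem.Int.toBin a).toList = Nat.toDigits 2 a.toNat := by
    rw [PySem.Int.toList_toBin]
    unfold PySem.Int.toBinChars
    simp [not_lt.mpr ha]
  have htB : (PySem.Int.toBin b).toList = Nat.toDigits 2 b.toNat := by
    rw [PySem.Int.toList_toBin]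
    unfold PySem.Int.toBinChars
    simp [not_lt.mpr hb]
  have hlenA : PySem.Str.len (PySem.Int.toBin a) = ((Nat.toDigits 2 a.toNat).length : Int) := by
    simp [PySem.Str.len, htA]
  have hlenB : PySem.Str.len (PySem.Int.toBin b) = ((Nat.toDigits 2 b.toNat).length : Int) := by
    simp [PySem.Str.len, htB]
  have hmax : max (PySem.Str.len (PySem.Int.toBin a)) (PySem.Str.len (PySem.Int.toBin b)) =
      ((max (max 1 (Nat.toDigits 2 a.toNat).length) (max 1 (Nat.toDigits 2 b.toNat).length) : Nat) : Int) := by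
    rw [hlenA, hlenB]
    have h1 : 1 ≤ (Nat.toDigits 2 a.toNat).length := by
      rw [toDigits_eq_bchars, bchars_eq_padBits, length_padBits]; omega
    have h2 : 1 ≤ (Nat.toDigits 2 b.toNat).length := by
      rw [toDigits_eq_bchars, bchars_eq_padBits, length_padBits]; omega
    push_cast
    omega
  rw [hmax]
  rw [PySem.Str.toList_zfill, PySem.Str.toList_zfill, htA, htB]
  exact toBinChars_or a.toNat b.toNat
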